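-- pv_equiv track=rewrite | github.com/Wasiq-Usman/python-project | Flight_Logs.py | count_arrivals_and_departures
-- ===== SOURCE A (Python) =====
-- def count_arrivals_and_departures(data, departure_column, arrival_column):
--     airport_count = {}
--
--     for row in data:
--         if row[departure_column]:
--             departure_airport = row[departure_column]
--             if departure_airport in airport_count:
--                 airport_count[departure_airport]['departures'] += 1
--             else:
--                 airport_count[departure_airport] = {'departures': 1, 'arrivals': 0}
--         if row[arrival_column]:
--             arrival_airport = row[arrival_column]
--             if arrival_airport in airport_count:
--                 airport_count[arrival_airport]['arrivals'] += 1
--             else: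
--                 airport_count[arrival_airport] = {'departures': 0, 'arrivals': 1}
--
--     return airport_count
-- ===== SOURCE B (Python) =====
-- def _tally(xs):
--     counts = {}
--     for x in xs:
--         counts[x] = counts.get(x, 0) + 1
--     return counts
--
--
-- def count_arrivals_and_departures(data, departure_column, arrival_column):
--     dep_count = _tally([r[departure_column] for r in data if r[departure_column]])
--     arr_count = _tally([r[arrival_column] for r in data if r[arrival_column]])
--     stream = [x for r in data
--               for x in (r[departure_column], r[arrival_column]) if x]
--     return {a: {'departures': dep_count.get(a, 0),
--                 'arrivals': arr_count.get(a, 0)}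
--             for a in dict.fromkeys(stream)}
-- ===== Notes on version B (the rewrite author's own statement) =====
-- stated objective: alternative
-- what changed: Replaces A's single interleaved per-row increment-or-insert pass with two separate tally aggregations (departures, arrivals) plus a merge over the first-occurrence-ordered union of keys.
import Mathlib
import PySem

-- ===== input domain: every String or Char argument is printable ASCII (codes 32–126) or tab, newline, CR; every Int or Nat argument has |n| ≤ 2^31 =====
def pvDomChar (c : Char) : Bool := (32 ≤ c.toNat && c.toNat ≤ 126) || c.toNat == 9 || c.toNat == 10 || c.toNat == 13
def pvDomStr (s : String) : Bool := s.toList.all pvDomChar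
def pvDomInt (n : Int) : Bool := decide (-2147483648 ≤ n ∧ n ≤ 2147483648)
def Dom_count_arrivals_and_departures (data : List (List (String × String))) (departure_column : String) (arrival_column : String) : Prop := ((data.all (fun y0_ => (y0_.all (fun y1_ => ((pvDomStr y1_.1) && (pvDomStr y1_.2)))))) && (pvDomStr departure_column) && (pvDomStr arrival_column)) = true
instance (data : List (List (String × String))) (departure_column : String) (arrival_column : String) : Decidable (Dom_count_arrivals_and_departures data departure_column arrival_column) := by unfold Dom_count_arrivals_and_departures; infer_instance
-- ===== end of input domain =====

-- B replaces A's interleaved per-row increment-or-insert pass with two tally aggregations plus a merge (alternative decomposition, same cost).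

-- ===== PORT A =====
-- row[col] on a Python dict: first-match lookup; "" default is only reached outside Pre_ (Python raises KeyError there)
def pvRowGet (row : List (String × String)) (col : String) : String :=
  (PySem.Dict.mk row).getD col ""

def pvStepA (dep arr : String) (d : PySem.Dict String (PySem.Dict String Int)) (row : List (String × String)) : PySem.Dict String (PySem.Dict String Int) :=
  let d1 :=
    if pvRowGet row dep ≠ "" then
      let k := pvRowGet row dep
      if d.contains k then
        d.modify k PySem.Dict.empty (fun inner => inner.modify "departures" 0 (· + 1))
      else
        d.insert k (PySem.Dict.mk [("departures", 1), ("arrivals", 0)])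
    else d
  if pvRowGet row arr ≠ "" then
    let k := pvRowGet row arr
    if d1.contains k then
      d1.modify k PySem.Dict.empty (fun inner => inner.modify "arrivals" 0 (· + 1))
    else
      d1.insert k (PySem.Dict.mk [("departures", 0), ("arrivals", 1)])
  else d1

def count_arrivals_and_departures (data : List (List (String × String))) (departure_column : String) (arrival_column : String) : List (String × List (String × Int)) :=
  ((data.foldl (pvStepA departure_column arrival_column) PySem.Dict.empty).items).map
    (fun p => (p.1, p.2.items))

-- ===== PORT B =====
def pvTally (xs : List String) : PySem.Dict String Int :=
  xs.foldl (fun c x => c.insert x (c.getD x 0 + 1)) PySem.Dict.empty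

def count_arrivals_and_departures_alt (data : List (List (String × String))) (departure_column : String) (arrival_column : String) : List (String × List (String × Int)) :=
  let dep_count := pvTally ((data.filter (fun r => pvRowGet r departure_column != "")).map (fun r => pvRowGet r departure_column))
  let arr_count := pvTally ((data.filter (fun r => pvRowGet r arrival_column != "")).map (fun r => pvRowGet r arrival_column))
  let stream := data.flatMap (fun r => [pvRowGet r departure_column, pvRowGet r arrival_column].filter (fun x => x != ""))
  (PySem.List.dedup stream).map
    (fun a => (a, [("departures", dep_count.getD a 0), ("arrivals", arr_count.getD a 0)]))

-- ===== PRECONDITION & SPEC =====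
-- Pre_ excludes exactly the inputs where Python A raises KeyError: a row missing one of the two columns.
def Pre_count_arrivals_and_departures (data : List (List (String × String))) (departure_column : String) (arrival_column : String) : Prop :=
  ∀ row ∈ data, departure_column ∈ row.map Prod.fst ∧ arrival_column ∈ row.map Prod.fst
instance (data : List (List (String × String))) (departure_column : String) (arrival_column : String) : Decidable (Pre_count_arrivals_and_departures data departure_column arrival_column) := by unfold Pre_count_arrivals_and_departures; infer_instance

def pvWitness_count_arrivals_and_departures : (List (List (String × String))) × String × String :=
  ([[("dep", "JFK"), ("arr", "LAX")], [("dep", "LAX"), ("arr", "")]], "dep", "arr")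

def Spec_count_arrivals_and_departures (data : List (List (String × String))) (departure_column : String) (arrival_column : String) (out : List (String × List (String × Int))) : Prop := out = count_arrivals_and_departures_alt data departure_column arrival_column
instance (data : List (List (String × String))) (departure_column : String) (arrival_column : String) (out : List (String × List (String × Int))) : Decidable (Spec_count_arrivals_and_departures data departure_column arrival_column out) := by unfold Spec_count_arrivals_and_departures; infer_instance

-- ===== CLAIM (what is proved, stated in full; the proofs are below) =====
def Claim_equal_count_arrivals_and_departures : Prop := ∀ (data : List (List (String × String))) (departure_column : String) (arrival_column : String), Dom_count_arrivals_and_departures data departure_column arrival_column → Pre_count_arrivals_and_departures data departure_column arrival_column → Spec_count_arrivals_and_departures data departure_column arrival_column (count_arrivals_and_departures data departure_column arrival_column)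

-- ===== LEMMAS AND PROOFS =====

-- The interleaved stream of (airport, isDeparture) events A processes
def pvEvents (dep arr : String) (data : List (List (String × String))) : List (String × Bool) :=
  data.flatMap (fun r =>
    (if pvRowGet r dep ≠ "" then [(pvRowGet r dep, true)] else []) ++
    (if pvRowGet r arr ≠ "" then [(pvRowGet r arr, false)] else []))

def pvStepE (d : PySem.Dict String (PySem.Dict String Int)) (e : String × Bool) : PySem.Dict String (PySem.Dict String Int) :=
  if e.2 then
    if d.contains e.1 then
      d.modify e.1 PySem.Dict.empty (fun inner => inner.modify "departures" 0 (· + 1))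
    else
      d.insert e.1 (PySem.Dict.mk [("departures", 1), ("arrivals", 0)])
  else
    if d.contains e.1 then
      d.modify e.1 PySem.Dict.empty (fun inner => inner.modify "arrivals" 0 (· + 1))
    else
      d.insert e.1 (PySem.Dict.mk [("departures", 0), ("arrivals", 1)])

def pvDep (es : List (String × Bool)) : List String := (es.filter (fun e => e.2)).map Prod.fst
def pvArr (es : List (String × Bool)) : List String := (es.filter (fun e => !e.2)).map Prod.fst

def pvVal (es : List (String × Bool)) (a : String) : PySem.Dict String Int :=
  PySem.Dict.mk [("departures", ((pvDep es).count a : Int)), ("arrivals", ((pvArr es).count a : Int))]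

def pvShape (es : List (String × Bool)) : PySem.Dict String (PySem.Dict String Int) :=
  PySem.Dict.mk ((PySem.List.dedup (es.map Prod.fst)).map (fun a => (a, pvVal es a)))

theorem pv_events_cons (dep arr : String) (r : List (String × String)) (t : List (List (String × String))) :
    pvEvents dep arr (r :: t)
      = ((if pvRowGet r dep ≠ "" then [(pvRowGet r dep, true)] else []) ++
         (if pvRowGet r arr ≠ "" then [(pvRowGet r arr, false)] else [])) ++ pvEvents dep arr t := by
  rw [pvEvents, List.flatMap_cons, ← pvEvents]

theorem pvDep_app (x y : List (String × Bool)) : pvDep (x ++ y) = pvDep x ++ pvDep y := by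
  simp [pvDep, List.filter_append]

theorem pvArr_app (x y : List (String × Bool)) : pvArr (x ++ y) = pvArr x ++ pvArr y := by
  simp [pvArr, List.filter_append]

theorem pvDep_append (es : List (String × Bool)) (e : String × Bool) :
    pvDep (es ++ [e]) = pvDep es ++ (if e.2 then [e.1] else []) := by
  cases he : e.2 <;> simp [pvDep, List.filter_append, he]

theorem pvArr_append (es : List (String × Bool)) (e : String × Bool) :
    pvArr (es ++ [e]) = pvArr es ++ (if e.2 then [] else [e.1]) := by
  cases he : e.2 <;> simp [pvArr, List.filter_append, he]

theorem pvDep_subset (es : List (String × Bool)) (a : String) (h : a ∈ pvDep es) : a ∈ es.map Prod.fst := by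
  simp only [pvDep, List.mem_map] at h
  obtain ⟨e, he, rfl⟩ := h
  exact List.mem_map_of_mem (List.mem_of_mem_filter he)

theorem pvArr_subset (es : List (String × Bool)) (a : String) (h : a ∈ pvArr es) : a ∈ es.map Prod.fst := by
  simp only [pvArr, List.mem_map] at h
  obtain ⟨e, he, rfl⟩ := h
  exact List.mem_map_of_mem (List.mem_of_mem_filter he)

theorem pvVal_append_ne (es : List (String × Bool)) (e : String × Bool) (a : String) (h : a ≠ e.1) :
    pvVal (es ++ [e]) a = pvVal es a := by
  have h'' : ¬ e.1 = a := fun hh => h hh.symm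
  simp [pvVal, pvDep_append, pvArr_append, List.count_append]
  cases he : e.2 <;> simp [h'']

theorem pv_get?_mk_map {ν : Type} (L : List String) (g : String → ν) (k : String) :
    (PySem.Dict.mk (L.map (fun a => (a, g a)))).get? k = if k ∈ L then some (g k) else none := by
  induction L with
  | nil => rfl
  | cons a t ih =>
    rw [List.map_cons, PySem.Dict.get?_mk_cons, ih]
    by_cases h : a = k
    · subst h; simp
    · have h' : ¬ k = a := fun hh => h hh.symm
      simp [h, h']

theorem pv_dedup_append (l : List String) (x : String) :
    PySem.List.dedup (l ++ [x]) = if x ∈ l then PySem.List.dedup l else PySem.List.dedup l ++ [x] := by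
  have hfold : ∀ m : List String, PySem.List.dedup m = m.foldl PySem.Set.add [] := by
    intro m; simp [PySem.List.dedup_eq_ofList, PySem.Set.ofList_eq_foldl]
  rw [hfold, List.foldl_append, List.foldl_cons, List.foldl_nil, ← hfold]
  by_cases hx : x ∈ l <;> simp [PySem.Set.add, hx]

theorem pv_contains_shape (es : List (String × Bool)) (k : String) :
    (pvShape es).contains k = decide (k ∈ es.map Prod.fst) := by
  rw [pvShape, PySem.Dict.contains_eq_isSome_get?, pv_get?_mk_map]
  by_cases h : k ∈ PySem.List.dedup (es.map Prod.fst)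
  · simp [(PySem.List.mem_dedup _ _).mp h]
  · have : k ∉ es.map Prod.fst := fun hh => h ((PySem.List.mem_dedup _ _).mpr hh)
    simp [this]

theorem pv_getD_shape (es : List (String × Bool)) (k : String) (h : k ∈ es.map Prod.fst) :
    (pvShape es).getD k PySem.Dict.empty = pvVal es k := by
  have : k ∈ PySem.List.dedup (es.map Prod.fst) := (PySem.List.mem_dedup _ _).mpr h
  show ((pvShape es).get? k).getD _ = _
  rw [pvShape, pv_get?_mk_map, if_pos this]
  rfl

theorem pv_step_shape (es : List (String × Bool)) (e : String × Bool) :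
    pvStepE (pvShape es) e = pvShape (es ++ [e]) := by
  by_cases hk : e.1 ∈ es.map Prod.fst
  · -- key already present: modify updates the existing entry in place
    have hc : (pvShape es).contains e.1 = true := by simp [pv_contains_shape, hk]
    have hded : PySem.List.dedup ((es ++ [e]).map Prod.fst) = PySem.List.dedup (es.map Prod.fst) := by
      rw [List.map_append, List.map_singleton, pv_dedup_append]
      simp [hk]
    have hmod : ∀ f : PySem.Dict String Int → PySem.Dict String Int,
        (pvShape es).modify e.1 PySem.Dict.empty f
          = PySem.Dict.mk ((PySem.List.dedup (es.map Prod.fst)).map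
              (fun a => if a == e.1 then (e.1, f (pvVal es e.1)) else (a, pvVal es a))) := by
      intro f
      have : (pvShape es).modify e.1 PySem.Dict.empty f
          = (pvShape es).insert e.1 (f (pvVal es e.1)) := by
        show (pvShape es).insert e.1 (f ((pvShape es).getD e.1 PySem.Dict.empty)) = _
        rw [pv_getD_shape es e.1 hk]
      rw [this]
      apply PySem.Dict.ext
      rw [PySem.Dict.items_insert_of_contains _ _ hc]
      show (List.map _ _).map _ = _
      rw [List.map_map]
      apply List.map_congr_left
      intro a _
      by_cases ha : a = e.1
      · subst ha; simp
      · have ha' : (a == e.1) = false := by simp [ha]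
        simp [ha', ha]
    cases he : e.2
    · -- arrival event
      have : pvStepE (pvShape es) e = (pvShape es).modify e.1 PySem.Dict.empty
          (fun inner => inner.modify "arrivals" 0 (· + 1)) := by simp [pvStepE, he, hc]
      rw [this, hmod, pvShape, hded]
      congr 1
      apply List.map_congr_left
      intro a _
      by_cases ha : a = e.1
      · subst ha
        simp only [beq_self_eq_true, if_true]
        congr 1
        have harr : (pvArr (es ++ ⟨e.1, e.2⟩ :: [])).count e.1 = (pvArr es).count e.1 + 1 := by
          rw [pvArr_append]; simp [he, List.count_append]
        have hdep : (pvDep (es ++ ⟨e.1, e.2⟩ :: [])).count e.1 = (pvDep es).count e.1 := by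
          rw [pvDep_append]; simp [he]
        simp [pvVal, PySem.Dict.modify, PySem.Dict.insert, PySem.Dict.getD, PySem.Dict.get?,
              PySem.Dict.contains, harr, hdep]
      · have ha' : (a == e.1) = false := by simp [ha]
        rw [ha', if_neg (by simp), pvVal_append_ne es e a ha]
    · -- departure event
      have : pvStepE (pvShape es) e = (pvShape es).modify e.1 PySem.Dict.empty
          (fun inner => inner.modify "departures" 0 (· + 1)) := by simp [pvStepE, he, hc]
      rw [this, hmod, pvShape, hded]
      congr 1
      apply List.map_congr_left
      intro a _
      by_cases ha : a = e.1
      · subst ha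
        simp only [beq_self_eq_true, if_true]
        congr 1
        have hdep : (pvDep (es ++ ⟨e.1, e.2⟩ :: [])).count e.1 = (pvDep es).count e.1 + 1 := by
          rw [pvDep_append]; simp [he, List.count_append]
        have harr : (pvArr (es ++ ⟨e.1, e.2⟩ :: [])).count e.1 = (pvArr es).count e.1 := by
          rw [pvArr_append]; simp [he]
        simp [pvVal, PySem.Dict.modify, PySem.Dict.insert, PySem.Dict.getD, PySem.Dict.get?,
              PySem.Dict.contains, harr, hdep]
      · have ha' : (a == e.1) = false := by simp [ha]
        rw [ha', if_neg (by simp), pvVal_append_ne es e a ha]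
  · -- fresh key: insert appends
    have hc : (pvShape es).contains e.1 = false := by simp [pv_contains_shape, hk]
    have hded : PySem.List.dedup ((es ++ [e]).map Prod.fst)
        = PySem.List.dedup (es.map Prod.fst) ++ [e.1] := by
      rw [List.map_append, List.map_singleton, pv_dedup_append]
      simp [hk]
    have hdep0 : (pvDep es).count e.1 = 0 :=
      List.count_eq_zero.mpr (fun h => hk (pvDep_subset es e.1 h))
    have harr0 : (pvArr es).count e.1 = 0 :=
      List.count_eq_zero.mpr (fun h => hk (pvArr_subset es e.1 h))
    have hval : pvVal (es ++ [e]) e.1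
        = PySem.Dict.mk [("departures", if e.2 then 1 else 0), ("arrivals", if e.2 then 0 else 1)] := by
      cases he : e.2 <;>
        simp [pvVal, pvDep_append, pvArr_append, he, List.count_append, hdep0, harr0]
    have hins : ∀ v : PySem.Dict String Int,
        (pvShape es).insert e.1 v
          = PySem.Dict.mk ((PySem.List.dedup (es.map Prod.fst)).map (fun a => (a, pvVal es a)) ++ [(e.1, v)]) := by
      intro v
      apply PySem.Dict.ext
      rw [PySem.Dict.items_insert_of_not_contains _ _ hc]
      rfl
    have hmap : (PySem.List.dedup (es.map Prod.fst)).map (fun a => (a, pvVal (es ++ [e]) a))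
        = (PySem.List.dedup (es.map Prod.fst)).map (fun a => (a, pvVal es a)) := by
      apply List.map_congr_left
      intro a ha
      have ha' : a ∈ es.map Prod.fst := (PySem.List.mem_dedup _ _).mp ha
      have : a ≠ e.1 := fun hh => hk (hh ▸ ha')
      rw [pvVal_append_ne es e a this]
    cases he : e.2
    · have : pvStepE (pvShape es) e
          = (pvShape es).insert e.1 (PySem.Dict.mk [("departures", 0), ("arrivals", 1)]) := by
        simp [pvStepE, he, hc]
      rw [this, hins, pvShape, hded, List.map_append, List.map_singleton, hmap, hval]
      simp [he]
    · have : pvStepE (pvShape es) e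
          = (pvShape es).insert e.1 (PySem.Dict.mk [("departures", 1), ("arrivals", 0)]) := by
        simp [pvStepE, he, hc]
      rw [this, hins, pvShape, hded, List.map_append, List.map_singleton, hmap, hval]
      simp [he]

theorem pv_foldlA_eq_foldlE (dep arr : String) (data : List (List (String × String))) (d0 : PySem.Dict String (PySem.Dict String Int)) :
    data.foldl (pvStepA dep arr) d0 = (pvEvents dep arr data).foldl pvStepE d0 := by
  induction data generalizing d0 with
  | nil => rfl
  | cons r t ih =>
    have hrow : pvStepA dep arr d0 r =
        ((if pvRowGet r dep ≠ "" then [(pvRowGet r dep, true)] else []) ++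
         (if pvRowGet r arr ≠ "" then [(pvRowGet r arr, false)] else [])).foldl pvStepE d0 := by
      by_cases h1 : pvRowGet r dep ≠ "" <;> by_cases h2 : pvRowGet r arr ≠ "" <;>
        simp [pvStepA, pvStepE, h1, h2]
    rw [List.foldl_cons, hrow, pv_events_cons]
    simp only [List.foldl_append]
    exact ih _

theorem pv_foldlE_eq_shape (es : List (String × Bool)) :
    es.foldl pvStepE PySem.Dict.empty = pvShape es := by
  induction es using List.reverseRecOn with
  | nil => rfl
  | append_singleton es e ih =>
    rw [List.foldl_append, List.foldl_cons, List.foldl_nil, ih, pv_step_shape]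

theorem pv_deps_eq (dep arr : String) (data : List (List (String × String))) :
    (data.filter (fun r => pvRowGet r dep != "")).map (fun r => pvRowGet r dep)
      = pvDep (pvEvents dep arr data) := by
  induction data with
  | nil => rfl
  | cons r t ih =>
    rw [pv_events_cons, pvDep_app, pvDep_app, ← ih]
    by_cases h1 : pvRowGet r dep ≠ "" <;> by_cases h2 : pvRowGet r arr ≠ "" <;>
      simp [pvDep, h1, h2]

theorem pv_arrs_eq (dep arr : String) (data : List (List (String × String))) :
    (data.filter (fun r => pvRowGet r arr != "")).map (fun r => pvRowGet r arr)
      = pvArr (pvEvents dep arr data) := by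
  induction data with
  | nil => rfl
  | cons r t ih =>
    rw [pv_events_cons, pvArr_app, pvArr_app, ← ih]
    by_cases h1 : pvRowGet r dep ≠ "" <;> by_cases h2 : pvRowGet r arr ≠ "" <;>
      simp [pvArr, h1, h2]

theorem pv_stream_eq (dep arr : String) (data : List (List (String × String))) :
    data.flatMap (fun r => [pvRowGet r dep, pvRowGet r arr].filter (fun x => x != ""))
      = (pvEvents dep arr data).map Prod.fst := by
  induction data with
  | nil => rfl
  | cons r t ih =>
    rw [List.flatMap_cons, pv_events_cons, List.map_append, ← ih]
    by_cases h1 : pvRowGet r dep ≠ "" <;> by_cases h2 : pvRowGet r arr ≠ "" <;>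
      simp [List.filter_cons, h1, h2]

theorem pv_alt_eq_shape (data : List (List (String × String))) (dep arr : String) :
    count_arrivals_and_departures_alt data dep arr
      = (pvShape (pvEvents dep arr data)).items.map (fun p => (p.1, p.2.items)) := by
  rw [count_arrivals_and_departures_alt]
  have htal : ∀ xs : List String, pvTally xs = PySem.Dict.counter xs := by
    intro xs; exact PySem.Dict.foldl_insert_getD_add_one_eq_counter xs
  rw [htal, htal, pv_deps_eq dep arr, pv_arrs_eq dep arr, pv_stream_eq]
  show _ = (List.map _ _).map _
  rw [List.map_map]
  apply List.map_congr_left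
  intro a _
  simp [PySem.Dict.getD_counter, pvVal]

-- ===== VERDICT (by name: the statement is the Claim_ definition above) =====
theorem count_arrivals_and_departures_spec : Claim_equal_count_arrivals_and_departures := by
  intro data dep arr _ _
  show _ = _
  rw [count_arrivals_and_departures, pv_foldlA_eq_foldlE, pv_foldlE_eq_shape, pv_alt_eq_shape]
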